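-- pv_equiv track=rewrite | github.com/eu-snehagupta/LearningPython | codility/codility2/main.py | solution
-- ===== SOURCE A (Python) =====
-- def solution(X, Y, A):
--     N = len(A)
--     result = -1
--     nX = 0
--     nY = 0
--     for i in range(N):
--         if A[i] == X:
--             nX += 1
--         elif A[i] == Y:
--             nY += 1
--         if nX == nY:
--             result = 1
--     return result
-- ===== SOURCE B (Python) =====
-- def solution(X, Y, A):
--     # Balance walk: +1 at X, -1 at Y (X wins ties), 0 otherwise. The walk moves
--     # in unit steps, so by the discrete intermediate-value theorem it touches 0
--     # on some nonempty prefix iff its running minimum and maximum bracket 0.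
--     if not A:
--         return -1
--     def delta(a):
--         return 1 if a == X else (-1 if a == Y else 0)
--     s = lo = hi = delta(A[0])
--     for a in A[1:]:
--         s += delta(a)
--         if s < lo:
--             lo = s
--         if s > hi:
--             hi = s
--     return 1 if lo <= 0 <= hi else -1
-- ===== Notes on version B (the rewrite author's own statement) =====
-- stated objective: alternative
-- what changed: Replaces A's per-step counter-equality check with tracking only the running min and max of the X/Y balance walk and a single final discrete intermediate-value test (answer is 1 iff min <= 0 <= max).
import Mathlib
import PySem

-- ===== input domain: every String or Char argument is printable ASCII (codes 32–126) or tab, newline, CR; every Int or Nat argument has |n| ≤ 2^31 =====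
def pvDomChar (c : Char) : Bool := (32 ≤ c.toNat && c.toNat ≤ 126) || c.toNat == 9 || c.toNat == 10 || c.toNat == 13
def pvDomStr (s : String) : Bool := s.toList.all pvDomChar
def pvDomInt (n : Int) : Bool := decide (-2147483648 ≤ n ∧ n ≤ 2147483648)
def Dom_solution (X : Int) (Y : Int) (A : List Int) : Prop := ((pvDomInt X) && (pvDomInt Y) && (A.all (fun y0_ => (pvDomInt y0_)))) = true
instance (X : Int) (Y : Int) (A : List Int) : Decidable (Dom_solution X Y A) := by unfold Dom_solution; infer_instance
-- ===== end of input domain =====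

-- B drops A's per-step counter-equality check: it tracks only the running min/max of the
-- ±1 balance walk and decides by a discrete intermediate-value test (1 iff min ≤ 0 ≤ max).

-- ===== PORT A =====
-- loop over A with state (result, nX, nY), exactly as the Python for-loop
def solution (X : Int) (Y : Int) (A : List Int) : Int :=
  let st := A.foldl (fun (st : Int × Int × Int) a =>
    let nX := if a = X then st.2.1 + 1 else st.2.1
    let nY := if a = X then st.2.2 else if a = Y then st.2.2 + 1 else st.2.2
    let result := if nX = nY then 1 else st.1
    (result, nX, nY)) (-1, 0, 0)
  st.1

-- ===== PORT B =====
-- empty guard; then a fold over the tail carrying (s, lo, hi) seeded with the first delta;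
-- final bracket test lo ≤ 0 ≤ hi
def solution_alt (X : Int) (Y : Int) (A : List Int) : Int :=
  match A with
  | [] => -1
  | a0 :: rest =>
    let delta : Int → Int := fun a => if a = X then 1 else if a = Y then -1 else 0
    let s0 := delta a0
    let st := rest.foldl (fun (st : Int × Int × Int) a =>
        let s := st.1 + delta a
        (s, min st.2.1 s, max st.2.2 s)) (s0, s0, s0)
    if st.2.1 ≤ 0 ∧ 0 ≤ st.2.2 then 1 else -1

-- ===== PRECONDITION & SPEC =====
def Spec_solution (X : Int) (Y : Int) (A : List Int) (out : Int) : Prop := out = solution_alt X Y A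
instance (X : Int) (Y : Int) (A : List Int) (out : Int) : Decidable (Spec_solution X Y A out) := by unfold Spec_solution; infer_instance

-- ===== CLAIM (what is proved, stated in full; the proofs are below) =====
def Claim_equal_solution : Prop := ∀ (X : Int) (Y : Int) (A : List Int), Dom_solution X Y A → Spec_solution X Y A (solution X Y A)

-- ===== LEMMAS AND PROOFS =====

-- running prefix sums of ds starting from s
def pvPrefixes (ds : List Int) (s : Int) : List Int :=
  match ds with
  | [] => []
  | d :: t => (s + d) :: pvPrefixes t (s + d)

-- A's loop returns 1 iff the balance walk hits 0 on some nonempty prefix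
theorem pvLoopA_eq (X Y : Int) (xs : List Int) (r nX nY : Int) :
    (xs.foldl (fun (st : Int × Int × Int) a =>
      let nX := if a = X then st.2.1 + 1 else st.2.1
      let nY := if a = X then st.2.2 else if a = Y then st.2.2 + 1 else st.2.2
      let result := if nX = nY then 1 else st.1
      (result, nX, nY)) (r, nX, nY)).1
    = if (0 : Int) ∈ pvPrefixes (xs.map (fun a => if a = X then (1 : Int) else if a = Y then -1 else 0)) (nX - nY) then 1 else r := by
  induction xs generalizing r nX nY with
  | nil => simp [pvPrefixes]
  | cons a t ih =>
      simp only [List.foldl_cons, List.map_cons, pvPrefixes]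
      by_cases hx : a = X
      · simp only [hx, if_true]
        rw [ih]
        have e : nX + 1 - nY = nX - nY + 1 := by ring
        rw [e]
        by_cases hm : (0 : Int) ∈ pvPrefixes (t.map (fun a => if a = X then (1 : Int) else if a = Y then -1 else 0)) (nX - nY + 1)
        · simp [hm]
        · simp only [List.mem_cons, hm, or_false]
          split_ifs <;> first | omega | exact ((by assumption : False).elim)
      · simp only [if_neg hx]
        by_cases hy : a = Y
        · simp only [hy, if_true]
          rw [ih]
          have e : nX - (nY + 1) = nX - nY + -1 := by ring
          rw [e]
          by_cases hm : (0 : Int) ∈ pvPrefixes (t.map (fun a => if a = X then (1 : Int) else if a = Y then -1 else 0)) (nX - nY + -1)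
          · simp [hm]
          · simp only [List.mem_cons, hm, or_false]
            split_ifs <;> first | omega | exact ((by assumption : False).elim)
        · simp only [if_neg hy]
          rw [ih]
          by_cases hm : (0 : Int) ∈ pvPrefixes (t.map (fun a => if a = X then (1 : Int) else if a = Y then -1 else 0)) (nX - nY)
          · simp [hm]
          · simp only [List.mem_cons, hm, or_false, add_zero]
            split_ifs <;> first | omega | exact ((by assumption : False).elim)

-- B's fold computes (final sum, min over prefixes, max over prefixes)
theorem pvFoldB_eq (ds : List Int) (s lo hi : Int) :
    ds.foldl (fun (st : Int × Int × Int) d => (st.1 + d, min st.2.1 (st.1 + d), max st.2.2 (st.1 + d))) (s, lo, hi)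
      = (s + ds.sum, (pvPrefixes ds s).foldl min lo, (pvPrefixes ds s).foldl max hi) := by
  induction ds generalizing s lo hi with
  | nil => simp [pvPrefixes]
  | cons d t ih => simp [pvPrefixes, ih, add_assoc]

theorem pvFoldlMin_le (l : List Int) (init c : Int) :
    l.foldl min init ≤ c ↔ init ≤ c ∨ ∃ x ∈ l, x ≤ c := by
  induction l generalizing init with
  | nil => simp
  | cons a t ih =>
      simp only [List.foldl_cons, ih, min_le_iff, List.mem_cons]
      constructor
      · rintro (h | ⟨x, hx, hxc⟩)
        · rcases h with h | h
          · exact Or.inl h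
          · exact Or.inr ⟨a, Or.inl rfl, h⟩
        · exact Or.inr ⟨x, Or.inr hx, hxc⟩
      · rintro (h | ⟨x, (rfl | hx), hxc⟩)
        · exact Or.inl (Or.inl h)
        · exact Or.inl (Or.inr hxc)
        · exact Or.inr ⟨x, hx, hxc⟩

theorem pvFoldlMax_le (l : List Int) (init c : Int) :
    c ≤ l.foldl max init ↔ c ≤ init ∨ ∃ x ∈ l, c ≤ x := by
  induction l generalizing init with
  | nil => simp
  | cons a t ih =>
      simp only [List.foldl_cons, ih, le_max_iff, List.mem_cons]
      constructor
      · rintro (h | ⟨x, hx, hxc⟩)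
        · rcases h with h | h
          · exact Or.inl h
          · exact Or.inr ⟨a, Or.inl rfl, h⟩
        · exact Or.inr ⟨x, Or.inr hx, hxc⟩
      · rintro (h | ⟨x, (rfl | hx), hxc⟩)
        · exact Or.inl (Or.inl h)
        · exact Or.inl (Or.inr hxc)
        · exact Or.inr ⟨x, hx, hxc⟩

-- discrete IVT, downward: a unit-step walk starting above 0 that reaches ≤ 0 passes 0
theorem pvIvtDown (ds : List Int) (s : Int) (hd : ∀ d ∈ ds, -1 ≤ d ∧ d ≤ 1) (hs : 1 ≤ s) :
    (∃ a ∈ pvPrefixes ds s, a ≤ 0) → 0 ∈ pvPrefixes ds s := by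
  induction ds generalizing s with
  | nil => simp [pvPrefixes]
  | cons d t ih =>
      rintro ⟨a, ha, ha0⟩
      have hdd := hd d (by simp)
      simp only [pvPrefixes, List.mem_cons] at ha ⊢
      rcases ha with rfl | ha
      · exact Or.inl (by omega)
      · by_cases h0 : s + d = 0
        · exact Or.inl (by omega)
        · exact Or.inr (ih (s + d) (fun x hx => hd x (by simp [hx])) (by omega) ⟨a, ha, ha0⟩)

-- discrete IVT, upward: a unit-step walk starting below 0 that reaches ≥ 0 passes 0
theorem pvIvtUp (ds : List Int) (s : Int) (hd : ∀ d ∈ ds, -1 ≤ d ∧ d ≤ 1) (hs : s ≤ -1) :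
    (∃ a ∈ pvPrefixes ds s, 0 ≤ a) → 0 ∈ pvPrefixes ds s := by
  induction ds generalizing s with
  | nil => simp [pvPrefixes]
  | cons d t ih =>
      rintro ⟨a, ha, ha0⟩
      have hdd := hd d (by simp)
      simp only [pvPrefixes, List.mem_cons] at ha ⊢
      rcases ha with rfl | ha
      · exact Or.inl (by omega)
      · by_cases h0 : s + d = 0
        · exact Or.inl (by omega)
        · exact Or.inr (ih (s + d) (fun x hx => hd x (by simp [hx])) (by omega) ⟨a, ha, ha0⟩)

-- the bracket test equals membership of 0, for unit-step walks
theorem pvBracket (ds : List Int) (s : Int) (hd : ∀ d ∈ ds, -1 ≤ d ∧ d ≤ 1) (hs : -1 ≤ s ∧ s ≤ 1) :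
    ((∃ a ∈ s :: pvPrefixes ds s, a ≤ 0) ∧ (∃ b ∈ s :: pvPrefixes ds s, 0 ≤ b))
      ↔ (0 : Int) ∈ s :: pvPrefixes ds s := by
  constructor
  · rintro ⟨⟨a, ha, ha0⟩, ⟨b, hb, hb0⟩⟩
    simp only [List.mem_cons] at ha hb ⊢
    by_cases h0 : s = 0
    · exact Or.inl h0.symm
    · rcases lt_or_gt_of_ne h0 with hneg | hpos
      · -- s ≤ -1 : the witness b ≥ 0 is in the tail
        rcases hb with rfl | hb
        · omega
        · exact Or.inr (pvIvtUp ds s hd (by omega) ⟨b, hb, hb0⟩)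
      · -- s ≥ 1 : the witness a ≤ 0 is in the tail
        rcases ha with rfl | ha
        · omega
        · exact Or.inr (pvIvtDown ds s hd (by omega) ⟨a, ha, ha0⟩)
  · intro h
    exact ⟨⟨0, h, le_refl 0⟩, ⟨0, h, le_refl 0⟩⟩

-- ===== VERDICT (by name: the statement is the Claim_ definition above) =====
theorem solution_spec : Claim_equal_solution := by
  intro X Y A _
  show solution X Y A = solution_alt X Y A
  cases A with
  | nil => simp [solution, solution_alt]
  | cons a0 rest =>
      simp only [solution, solution_alt]
      rw [pvLoopA_eq]
      have hmap : rest.foldl (fun (st : Int × Int × Int) a =>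
          (st.1 + (if a = X then (1:Int) else if a = Y then -1 else 0),
           min st.2.1 (st.1 + (if a = X then (1:Int) else if a = Y then -1 else 0)),
           max st.2.2 (st.1 + (if a = X then (1:Int) else if a = Y then -1 else 0))))
          (((if a0 = X then (1:Int) else if a0 = Y then -1 else 0)),
           ((if a0 = X then (1:Int) else if a0 = Y then -1 else 0)),
           ((if a0 = X then (1:Int) else if a0 = Y then -1 else 0)))
        = (rest.map (fun a => if a = X then (1:Int) else if a = Y then -1 else 0)).foldl
            (fun (st : Int × Int × Int) d => (st.1 + d, min st.2.1 (st.1 + d), max st.2.2 (st.1 + d)))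
            (((if a0 = X then (1:Int) else if a0 = Y then -1 else 0)),
             ((if a0 = X then (1:Int) else if a0 = Y then -1 else 0)),
             ((if a0 = X then (1:Int) else if a0 = Y then -1 else 0))) := by
        rw [List.foldl_map]
      rw [hmap, pvFoldB_eq]
      set d0 : Int := if a0 = X then (1:Int) else if a0 = Y then -1 else 0 with hd0
      set ds : List Int := rest.map (fun a => if a = X then (1:Int) else if a = Y then -1 else 0) with hds
      have hsub : (0 : Int) - 0 = 0 := by norm_num
      rw [hsub]
      have hP : pvPrefixes ((a0 :: rest).map (fun a => if a = X then (1:Int) else if a = Y then -1 else 0)) 0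
          = d0 :: pvPrefixes ds d0 := by
        simp [pvPrefixes, hd0, hds]
      rw [hP]
      have hbound : ∀ d ∈ ds, (-1 : Int) ≤ d ∧ d ≤ 1 := by
        intro d hd
        rw [hds] at hd
        rcases List.mem_map.mp hd with ⟨a, _, rfl⟩
        split_ifs <;> omega
      have hd0b : (-1 : Int) ≤ d0 ∧ d0 ≤ 1 := by rw [hd0]; split_ifs <;> omega
      have hbr := pvBracket ds d0 hbound hd0b
      have hmin : (pvPrefixes ds d0).foldl min d0 ≤ 0 ↔ ∃ a ∈ d0 :: pvPrefixes ds d0, a ≤ 0 := by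
        rw [pvFoldlMin_le]; simp
      have hmax : (0 : Int) ≤ (pvPrefixes ds d0).foldl max d0 ↔ ∃ b ∈ d0 :: pvPrefixes ds d0, (0:Int) ≤ b := by
        rw [pvFoldlMax_le]; simp
      by_cases hmem : (0 : Int) ∈ d0 :: pvPrefixes ds d0
      · have := hbr.mpr hmem
        rw [if_pos hmem, if_pos ⟨hmin.mpr this.1, hmax.mpr this.2⟩]
      · rw [if_neg hmem, if_neg]
        intro ⟨h1, h2⟩
        exact hmem (hbr.mp ⟨hmin.mp h1, hmax.mp h2⟩)
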